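-- pv_equiv track=rewrite | github.com/OCreativeTeen/AIComposer | gui/downloader.py | pick_best_caption_language
-- ===== SOURCE A (Python) =====
-- def pick_best_caption_language(all_languages):
--     """优先选择中文，其次英文；若无则返回 None"""
--     if not all_languages:
--         return None
--     zh_langs = [l for l in all_languages if l and (l.startswith('zh') or l in ('zh-Hans', 'zh-Hant', 'zh-CN', 'zh-TW'))]
--     en_langs = [l for l in all_languages if l and l.startswith('en')]
--     if zh_langs:
--         return zh_langs[0]
--     if en_langs:
--         return en_langs[0]
--     return all_languages[0]
-- ===== SOURCE B (Python) =====
-- def pick_best_caption_language(all_languages):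
--     """优先选择中文，其次英文；若无则返回 None"""
--     if not all_languages:
--         return None
--     first_zh = None
--     first_en = None
--     for l in all_languages:
--         if not l:
--             continue
--         if first_zh is None and l.startswith('zh'):
--             first_zh = l
--         if first_en is None and l.startswith('en'):
--             first_en = l
--     return first_zh or first_en or all_languages[0]
-- ===== Notes on version B (the rewrite author's own statement) =====
-- stated objective: alternative
-- what changed: Replaces the two full filtering comprehensions with a single in-order pass that maintains two running candidates (first zh, first en) and drops the redundant tuple-membership test.
import Mathlib
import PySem

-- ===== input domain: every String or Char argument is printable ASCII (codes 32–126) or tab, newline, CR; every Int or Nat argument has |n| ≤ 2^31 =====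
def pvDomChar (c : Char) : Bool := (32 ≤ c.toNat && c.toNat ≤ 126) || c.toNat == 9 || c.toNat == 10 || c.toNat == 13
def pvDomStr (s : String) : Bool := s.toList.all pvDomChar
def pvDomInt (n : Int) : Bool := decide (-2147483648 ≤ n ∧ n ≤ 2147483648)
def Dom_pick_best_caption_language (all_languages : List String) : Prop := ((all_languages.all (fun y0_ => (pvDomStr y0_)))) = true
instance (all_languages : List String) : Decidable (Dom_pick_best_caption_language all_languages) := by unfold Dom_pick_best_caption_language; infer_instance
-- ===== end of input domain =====

-- B replaces A's two filtering comprehensions (plus redundant tuple test) with one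
-- in-order pass keeping two running candidates; same result, different decomposition.

-- ===== PORT A =====
-- zh_langs comprehension predicate: l and (l.startswith('zh') or l in ('zh-Hans','zh-Hant','zh-CN','zh-TW'))
def pvAZh (l : String) : Bool :=
  (!(l == "")) && (PySem.Str.startswith l "zh" || (l == "zh-Hans" || l == "zh-Hant" || l == "zh-CN" || l == "zh-TW"))

-- en_langs comprehension predicate: l and l.startswith('en')
def pvAEn (l : String) : Bool := (!(l == "")) && PySem.Str.startswith l "en"

def pick_best_caption_language (all_languages : List String) : Option String :=
  if all_languages = [] then none
  else
    let zh_langs := all_languages.filter pvAZh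
    let en_langs := all_languages.filter pvAEn
    match zh_langs with
    | z :: _ => some z
    | [] =>
      match en_langs with
      | e :: _ => some e
      | [] => all_languages.head?   -- all_languages[0]; list is nonempty here

-- ===== PORT B =====
-- one pass, two accumulators (first_zh, first_en)
def pvBLoop : List String → Option String → Option String → Option String × Option String
  | [], zh, en => (zh, en)
  | l :: rest, zh, en =>
    if l == "" then pvBLoop rest zh en
    else
      pvBLoop rest
        (if zh = none ∧ PySem.Str.startswith l "zh" then some l else zh)
        (if en = none ∧ PySem.Str.startswith l "en" then some l else en)

def pick_best_caption_language_alt (all_languages : List String) : Option String :=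
  match all_languages with
  | [] => none
  | h :: _ =>
    let p := pvBLoop all_languages none none
    -- first_zh or first_en or all_languages[0]  (candidates are never the empty string)
    (p.1.orElse (fun _ => p.2)).orElse (fun _ => some h)

-- ===== PRECONDITION & SPEC =====
def Spec_pick_best_caption_language (all_languages : List String) (out : Option String) : Prop := out = pick_best_caption_language_alt all_languages
instance (all_languages : List String) (out : Option String) : Decidable (Spec_pick_best_caption_language all_languages out) := by unfold Spec_pick_best_caption_language; infer_instance

-- ===== CLAIM (what is proved, stated in full; the proofs are below) =====
def Claim_equal_pick_best_caption_language : Prop := ∀ (all_languages : List String), Dom_pick_best_caption_language all_languages → Spec_pick_best_caption_language all_languages (pick_best_caption_language all_languages)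

-- ===== LEMMAS AND PROOFS =====

-- B's single-scan zh predicate (what the loop tests on non-empty entries)
def pvBZh (l : String) : Bool := (!(l == "")) && PySem.Str.startswith l "zh"

-- A's zh predicate equals B's: every string in the tuple already starts with "zh"
lemma pvAZh_eq (l : String) : pvAZh l = pvBZh l := by
  by_cases h1 : l = "zh-Hans"; · subst h1; decide
  by_cases h2 : l = "zh-Hant"; · subst h2; decide
  by_cases h3 : l = "zh-CN"; · subst h3; decide
  by_cases h4 : l = "zh-TW"; · subst h4; decide
  have e1 : (l == "zh-Hans") = false := by simp [h1]
  have e2 : (l == "zh-Hant") = false := by simp [h2]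
  have e3 : (l == "zh-CN") = false := by simp [h3]
  have e4 : (l == "zh-TW") = false := by simp [h4]
  simp [pvAZh, pvBZh, e1, e2, e3, e4]

lemma pvBLoop_spec : ∀ (xs : List String) (zh en : Option String),
    pvBLoop xs zh en = (zh.or (xs.find? pvBZh), en.or (xs.find? pvAEn)) := by
  intro xs
  induction xs with
  | nil => intro zh en; simp [pvBLoop]
  | cons l rest ih =>
    intro zh en
    by_cases hl : l = ""
    · subst hl
      simp [pvBLoop, pvBZh, pvAEn, ih]
    · have hne : (l == "") = false := by simp [hl]
      simp only [pvBLoop, hne, Bool.false_eq_true, if_false]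
      rw [ih, Prod.mk.injEq]
      constructor
      · cases zh with
        | some z => simp
        | none =>
          simp only [List.find?_cons, pvBZh, hne, Bool.not_false, Bool.true_and, true_and]
          cases hst : PySem.Chars.startswith l.toList ['z', 'h'] <;> simp [hst]
      · cases en with
        | some e => simp
        | none =>
          simp only [List.find?_cons, pvAEn, hne, Bool.not_false, Bool.true_and, true_and]
          cases hst : PySem.Chars.startswith l.toList ['e', 'n'] <;> simp [hst]

-- ===== VERDICT (by name: the statement is the Claim_ definition above) =====
theorem pick_best_caption_language_spec : Claim_equal_pick_best_caption_language := by
  unfold Claim_equal_pick_best_caption_language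
  intro all_languages _
  unfold Spec_pick_best_caption_language
  cases all_languages with
  | nil => rfl
  | cons h t =>
    unfold pick_best_caption_language pick_best_caption_language_alt
    rw [pvBLoop_spec]
    have hf : (h :: t).filter pvAZh = (h :: t).filter pvBZh :=
      List.filter_congr (fun x _ => pvAZh_eq x)
    simp only [hf, reduceCtorEq, if_false, Option.orElse_eq_or, Option.none_or,
      ← List.head?_filter]
    cases hzl : List.filter pvBZh (h :: t) with
    | cons z zs => simp
    | nil =>
      cases hel : List.filter pvAEn (h :: t) <;> simp
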